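-- pv_equiv track=rewrite | github.com/hoahai/fastapi | functions/dataTransform.py | master_budget_campaigns_join
-- ===== SOURCE A (Python) =====
-- from collections import defaultdict
--
-- def master_budget_campaigns_join(
--     master_budget_data: list[dict],
--     campaigns: list[dict],
-- ) -> list[dict]:
--     """
--     Join master budget data with campaigns by (accountCode, adTypeCode).
--     """
--     lookup = defaultdict(list)
--
--     for c in campaigns:
--         key = (c.get("accountCode"), c.get("adTypeCode"))
--         lookup[key].append(c)
--
--     rows: list[dict] = []
--
--     for mb in master_budget_data:
--         key = (mb.get("accountCode"), mb.get("adTypeCode"))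
--         for c in lookup.get(key, []):
--             rows.append(
--                 {
--                     **mb,
--                     "customerId": c.get("customerId"),
--                     "campaignId": c.get("campaignId"),
--                     "campaignName": c.get("campaignName"),
--                     "budgetId": c.get("budgetId"),
--                     "campaignStatus": c.get("status"),
--                 }
--             )
--
--     return rows
-- ===== SOURCE B (Python) =====
-- def master_budget_campaigns_join(
--     master_budget_data: list[dict],
--     campaigns: list[dict],
-- ) -> list[dict]:
--     """
--     Join master budget data with campaigns by (accountCode, adTypeCode),
--     as a direct nested-loop join (no prebuilt index).
--     """
--     return [
--         {
--             **mb,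
--             "customerId": c.get("customerId"),
--             "campaignId": c.get("campaignId"),
--             "campaignName": c.get("campaignName"),
--             "budgetId": c.get("budgetId"),
--             "campaignStatus": c.get("status"),
--         }
--         for mb in master_budget_data
--         for c in campaigns
--         if (c.get("accountCode"), c.get("adTypeCode"))
--         == (mb.get("accountCode"), mb.get("adTypeCode"))
--     ]
-- ===== Notes on version B (the rewrite author's own statement) =====
-- stated objective: simpler
-- what changed: Replaced the defaultdict index-then-iterate join with a single nested-loop comprehension that scans campaigns in order for each master-budget row.
import Mathlib
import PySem

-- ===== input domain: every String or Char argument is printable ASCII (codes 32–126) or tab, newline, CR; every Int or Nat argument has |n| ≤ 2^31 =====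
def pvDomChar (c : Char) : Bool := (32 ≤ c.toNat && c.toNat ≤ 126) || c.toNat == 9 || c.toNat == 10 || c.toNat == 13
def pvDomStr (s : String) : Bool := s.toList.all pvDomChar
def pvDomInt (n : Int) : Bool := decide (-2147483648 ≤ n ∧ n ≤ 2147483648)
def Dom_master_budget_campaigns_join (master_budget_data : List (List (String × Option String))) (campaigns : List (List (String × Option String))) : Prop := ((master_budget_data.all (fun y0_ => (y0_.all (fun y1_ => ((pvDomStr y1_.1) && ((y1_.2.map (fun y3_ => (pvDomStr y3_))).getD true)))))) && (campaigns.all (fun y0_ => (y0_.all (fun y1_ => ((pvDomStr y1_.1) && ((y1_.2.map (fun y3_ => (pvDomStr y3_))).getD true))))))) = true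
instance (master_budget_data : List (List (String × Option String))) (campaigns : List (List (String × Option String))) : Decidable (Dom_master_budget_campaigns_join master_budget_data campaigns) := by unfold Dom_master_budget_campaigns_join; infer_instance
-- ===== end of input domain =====

-- B replaces A's defaultdict-index join by a direct nested-loop comprehension (simpler; not faster).

-- shared helpers for what BOTH Pythons write identically: d.get(k) on a dict and the merged row
-- d.get(k) on a Python dict; the assoc list is normalised with Dict.ofList (last value wins, first position kept)
def pvGet (d : List (String × Option String)) (k : String) : Option String :=
  (PySem.Dict.ofList d).getD k none

-- (d.get("accountCode"), d.get("adTypeCode"))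
def pvKey (d : List (String × Option String)) : Option String × Option String :=
  (pvGet d "accountCode", pvGet d "adTypeCode")

-- {**mb, "customerId": c.get("customerId"), …, "campaignStatus": c.get("status")}
def pvMerge (mb c : List (String × Option String)) : List (String × Option String) :=
  (((((((PySem.Dict.ofList mb).insert "customerId" (pvGet c "customerId")).insert
      "campaignId" (pvGet c "campaignId")).insert
      "campaignName" (pvGet c "campaignName")).insert
      "budgetId" (pvGet c "budgetId")).insert
      "campaignStatus" (pvGet c "status"))).items

-- ===== PORT A =====
def master_budget_campaigns_join (master_budget_data : List (List (String × Option String))) (campaigns : List (List (String × Option String))) : List (List (String × Option String)) :=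
  -- lookup = defaultdict(list); for c in campaigns: lookup[key].append(c)
  let lookup : PySem.Dict (Option String × Option String) (List (List (String × Option String))) :=
    campaigns.foldl (fun d c => d.modify (pvKey c) [] (· ++ [c])) PySem.Dict.empty
  -- rows = []; for mb in …: for c in lookup.get(key, []): rows.append({…})
  master_budget_data.foldl
    (fun rows mb =>
      (lookup.getD (pvKey mb) []).foldl (fun rows c => rows ++ [pvMerge mb c]) rows)
    []

-- ===== PORT B =====
def master_budget_campaigns_join_alt (master_budget_data : List (List (String × Option String))) (campaigns : List (List (String × Option String))) : List (List (String × Option String)) :=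
  master_budget_data.flatMap (fun mb =>
    (campaigns.filter (fun c => pvKey c == pvKey mb)).map (fun c => pvMerge mb c))

-- ===== PRECONDITION & SPEC =====
def Spec_master_budget_campaigns_join (master_budget_data : List (List (String × Option String))) (campaigns : List (List (String × Option String))) (out : List (List (String × Option String))) : Prop := out = master_budget_campaigns_join_alt master_budget_data campaigns
instance (master_budget_data : List (List (String × Option String))) (campaigns : List (List (String × Option String))) (out : List (List (String × Option String))) : Decidable (Spec_master_budget_campaigns_join master_budget_data campaigns out) := by unfold Spec_master_budget_campaigns_join; infer_instance

-- ===== CLAIM (what is proved, stated in full; the proofs are below) =====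
def Claim_equal_master_budget_campaigns_join : Prop := ∀ (master_budget_data : List (List (String × Option String))) (campaigns : List (List (String × Option String))), Dom_master_budget_campaigns_join master_budget_data campaigns → Spec_master_budget_campaigns_join master_budget_data campaigns (master_budget_campaigns_join master_budget_data campaigns)

-- ===== LEMMAS AND PROOFS =====

-- A's lookup.get(key, []) is exactly the campaigns with that key, in order
theorem pv_lookup_spec (campaigns : List (List (String × Option String)))
    (k : Option String × Option String) :
    (campaigns.foldl (fun d c => d.modify (pvKey c) [] (· ++ [c])) PySem.Dict.empty).getD k []
      = campaigns.filter (fun c => pvKey c == k) := by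
  have hmap :
      campaigns.foldl (fun d c => d.modify (pvKey c) [] (· ++ [c])) PySem.Dict.empty
        = (campaigns.map (fun c => (pvKey c, c))).foldl
            (fun d p => d.modify p.1 [] (· ++ [p.2])) PySem.Dict.empty := by
    rw [List.foldl_map]
  rw [hmap, PySem.Dict.getD_foldl_modify_append]
  simp [List.filter_map, Function.comp_def]

-- ===== VERDICT (by name: the statement is the Claim_ definition above) =====
theorem master_budget_campaigns_join_spec : Claim_equal_master_budget_campaigns_join := by
  intro mbd cs _
  unfold Spec_master_budget_campaigns_join master_budget_campaigns_join master_budget_campaigns_join_alt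
  simp only [pv_lookup_spec, PySem.List.foldl_append_singleton_eq_map,
    PySem.List.foldl_append_eq_flatMap, List.nil_append]
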